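-- pv_equiv track=rewrite | github.com/niks199/aoc_2023 | day_11_2.py | distance_image
-- ===== SOURCE A (Python) =====
-- def distance_image(image: []) -> []:
--     dist = []
--     ext = 1000000
--
--     for row in range(0, len(image)):
--         dist_line = []
--         for col in range(0, len(image[0])):
--             dist_line.append(1)
--         dist.append(dist_line)
--
--     col_adj = []
--     for col in range(0, len(image[0])):
--         g_count = 0
--         for row in range(0, len(image)):
--             if image[row][col] == '#':
--                 g_count += 1
--         if g_count == 0:
--             col_adj.append(col)
--
--     for row in range(0, len(image)):
--         for i in range(len(col_adj) - 1, -1, -1):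
--             dist[row][col_adj[i]] = ext
--
--     row_adj = []
--     for row in range(0, len(image)):
--         g_count = 0
--         for col in range(0, len(image[0])):
--             if image[row][col] == '#':
--                 g_count += 1
--         if g_count == 0:
--             row_adj.append(row)
--
--     for i in range(len(row_adj) - 1, -1, -1):
--         for col in range(0, len(image[0])):
--             dist[row_adj[i]][col] = ext
--
--     return dist
-- ===== SOURCE B (Python) =====
-- def distance_image(image: []) -> []:
--     ext = 1000000
--     ncols = len(image[0])
--     hash_cols = {c for row in image for c in range(ncols) if row[c] == '#'}
--     result = []
--     for row in image:
--         row_empty = '#' not in row[:ncols]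
--         result.append([ext if row_empty or c not in hash_cols else 1
--                        for c in range(ncols)])
--     return result
-- ===== Notes on version B (the rewrite author's own statement) =====
-- stated objective: faster
-- what changed: A builds an all-1 grid and then mutates it in four separate sweeps (per-column count, mark empty columns row by row, per-row count, overwrite empty rows); B precomputes the set of columns containing '#' and each row's emptiness in one scan and builds the whole result directly in a single pass: ext if the row or the column has no '#', else 1.
import Mathlib
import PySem

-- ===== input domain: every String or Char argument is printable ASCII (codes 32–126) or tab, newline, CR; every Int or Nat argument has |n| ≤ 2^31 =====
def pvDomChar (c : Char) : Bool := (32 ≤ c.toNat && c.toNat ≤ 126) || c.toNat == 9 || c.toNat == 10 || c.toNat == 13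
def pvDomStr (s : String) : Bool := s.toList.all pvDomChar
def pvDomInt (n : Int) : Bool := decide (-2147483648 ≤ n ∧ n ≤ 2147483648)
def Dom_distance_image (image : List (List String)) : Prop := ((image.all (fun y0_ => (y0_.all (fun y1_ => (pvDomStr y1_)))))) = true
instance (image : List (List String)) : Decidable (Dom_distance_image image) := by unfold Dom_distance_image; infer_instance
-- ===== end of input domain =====

-- B replaces A's four mutation sweeps over an all-1 grid by one scan precomputing the
-- '#'-columns and row emptiness, then builds the result directly (measured faster, same O(r*c)).

-- ===== PORT A =====
-- dist[row][col] = v  (Python list assignment; indices are in range under Pre_)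
def pvSet2 (d : List (List Int)) (r c : Nat) (v : Int) : List (List Int) :=
  d.set r ((d.getD r []).set c v)

def distance_image (image : List (List String)) : List (List Int) :=
  let ext : Int := 1000000
  let n := image.length
  let n0 := (image.headD []).length   -- len(image[0]); Pre_ excludes the empty image where Python raises
  let dist := (List.range n).foldl (fun d _ =>
      let dist_line := (List.range n0).foldl (fun l _ => l ++ [(1 : Int)]) []
      d ++ [dist_line]) []
  let col_adj := (List.range n0).foldl (fun acc col =>
      let g := (List.range n).foldl (fun g row =>
          if (image.getD row []).getD col "" == "#" then g + 1 else g) (0 : Int)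
      if g = 0 then acc ++ [col] else acc) []
  let dist := (List.range n).foldl (fun d row =>
      -- 'for i in range(len(col_adj)-1, -1, -1): dist[row][col_adj[i]] = ext' visits col_adj back to front
      col_adj.reverse.foldl (fun d c => pvSet2 d row c ext) d) dist
  let row_adj := (List.range n).foldl (fun acc row =>
      let g := (List.range n0).foldl (fun g col =>
          if (image.getD row []).getD col "" == "#" then g + 1 else g) (0 : Int)
      if g = 0 then acc ++ [row] else acc) []
  let dist := row_adj.reverse.foldl (fun d row =>
      (List.range n0).foldl (fun d c => pvSet2 d row c ext) d) dist
  dist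

-- ===== PORT B =====
def distance_image_alt (image : List (List String)) : List (List Int) :=
  let ext : Int := 1000000
  let ncols := (image.headD []).length   -- len(image[0]); Pre_ excludes the empty image where Python raises
  let hash_cols : PySem.Set Nat := PySem.Set.ofList (image.flatMap (fun row =>
      (List.range ncols).filter (fun c => row.getD c "" == "#")))
  (image.map (fun row =>
    let row_empty := !((row.take ncols).contains "#")
    (List.range ncols).map (fun c =>
      if row_empty || !(hash_cols.contains c) then ext else 1)))

-- ===== PRECONDITION & SPEC =====
-- Pre_ excludes exactly the inputs where Python A raises IndexError: the empty image
-- (len(image[0])) and images with a row shorter than the first row (image[row][col]).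
def Pre_distance_image (image : List (List String)) : Prop :=
  image ≠ [] ∧ ∀ row ∈ image, (image.headD []).length ≤ row.length
instance (image : List (List String)) : Decidable (Pre_distance_image image) := by
  unfold Pre_distance_image; infer_instance
def pvWitness_distance_image : List (List String) := [["#", "."], [".", "."]]

def Spec_distance_image (image : List (List String)) (out : List (List Int)) : Prop := out = distance_image_alt image
instance (image : List (List String)) (out : List (List Int)) : Decidable (Spec_distance_image image out) := by unfold Spec_distance_image; infer_instance

-- ===== CLAIM (what is proved, stated in full; the proofs are below) =====
def Claim_equal_distance_image : Prop := ∀ (image : List (List String)), Dom_distance_image image → Pre_distance_image image → Spec_distance_image image (distance_image image)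


-- ===== LEMMAS AND PROOFS =====

-- fold of 'l[j] = v' over an index list: length is preserved, entries become v exactly at listed indices
theorem pvSetFold_length {α : Type} (idxs : List Nat) (v : α) (l : List α) :
    (idxs.foldl (fun l j => l.set j v) l).length = l.length := by
  induction idxs generalizing l with
  | nil => rfl
  | cons j js ih => simp [List.foldl_cons, ih]

theorem pvSetFold_getElem {α : Type} (idxs : List Nat) (v : α) (l : List α) (i : Nat)
    (h : i < l.length) (h' : i < (idxs.foldl (fun l j => l.set j v) l).length) :
    (idxs.foldl (fun l j => l.set j v) l)[i] = if i ∈ idxs then v else l[i] := by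
  induction idxs generalizing l with
  | nil => simp
  | cons j js ih =>
    simp only [List.foldl_cons]
    rw [ih (l.set j v) (by simpa) (by simpa using h')]
    by_cases hji : i ∈ js
    · simp [hji]
    · by_cases hij : i = j
      · subst hij; simp [hji]
      · simp [hji, hij, Ne.symm hij]

-- fill of a row of length n0 by 'for c in range(n0): l[c] = v'
theorem pvFill (n0 : Nat) (v : Int) (l : List Int) (hl : l.length = n0) :
    (List.range n0).foldl (fun l c => l.set c v) l = List.replicate n0 v := by
  apply List.ext_getElem
  · simp [pvSetFold_length, hl]
  · intro i h1 h2
    rw [pvSetFold_getElem _ _ _ _ (by simp [pvSetFold_length, hl] at h1; omega) h1]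
    simp at h2
    simp [List.mem_range, h2]

-- collapsing the 2-d assignment dist[r][c] = v at a fixed row r
theorem pvSet2_foldl (cols : List Nat) (v : Int) (r : Nat) (d : List (List Int)) :
    cols.foldl (fun d c => pvSet2 d r c v) d
      = d.set r (cols.foldl (fun l c => l.set c v) (d.getD r [])) := by
  induction cols generalizing d with
  | nil =>
    simp only [List.foldl_nil]
    by_cases h : r < d.length
    · rw [List.getD_eq_getElem _ _ h]
      exact (List.set_getElem_self h).symm
    · exact (List.set_eq_of_length_le (by omega)).symm
  | cons c cs ih =>
    simp only [List.foldl_cons]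
    rw [ih]
    by_cases h : r < d.length
    · have hset : (pvSet2 d r c v).getD r [] = (d.getD r []).set c v := by
        unfold pvSet2
        rw [List.getD_eq_getElem _ _ (by simpa)]
        simp
      rw [hset]
      unfold pvSet2
      rw [List.set_set]
    · have hd : pvSet2 d r c v = d := by
        unfold pvSet2; exact List.set_eq_of_length_le (by omega)
      rw [hd, List.set_eq_of_length_le (by omega), List.set_eq_of_length_le (by omega)]

-- applying the same per-row transform to every row in index order is List.map
theorem pvMapFold (f : List Int → List Int) (d : List (List Int)) (k : Nat) (hk : k ≤ d.length) :
    (List.range k).foldl (fun d r => d.set r (f (d.getD r []))) d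
      = (d.take k).map f ++ d.drop k := by
  induction k with
  | zero => simp
  | succ k ih =>
    rw [List.range_succ, List.foldl_append]
    rw [ih (by omega)]
    simp only [List.foldl_cons, List.foldl_nil]
    have hk' : k < d.length := hk
    have hlen : ((d.take k).map f).length = k := by simp; omega
    have hgd : ((d.take k).map f ++ d.drop k).getD k [] = d[k] := by
      rw [List.getD_eq_getElem _ _ (by simp; omega)]
      rw [List.getElem_append_right (by omega)]
      simp [Nat.min_eq_left hk'.le]
    rw [hgd]
    rw [List.drop_eq_getElem_cons hk']
    have : ((d.take k).map f ++ d[k] :: d.drop (k + 1)).set k (f d[k])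
         = (d.take k).map f ++ f d[k] :: d.drop (k + 1) := by
      rw [List.set_append]
      simp only [hlen, if_neg (lt_irrefl k), Nat.sub_self, List.set_cons_zero]
    rw [this, List.take_succ_eq_append_getElem hk']
    simp
    rw [List.take_succ_eq_append_getElem (l := List.map f d) (by simpa using hk')]
    simp

-- the row-wiping phase: once every row has length n0, wiping a row writes replicate n0 v
theorem pvRowPhase (n0 : Nat) (v : Int) (rows : List Nat) (d : List (List Int))
    (hinv : ∀ l ∈ d, l.length = n0) :
    rows.foldl (fun d r => d.set r ((List.range n0).foldl (fun l c => l.set c v) (d.getD r []))) d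
      = rows.foldl (fun d r => d.set r (List.replicate n0 v)) d := by
  induction rows generalizing d with
  | nil => rfl
  | cons r rs ih =>
    simp only [List.foldl_cons]
    by_cases h : r < d.length
    · have : (List.range n0).foldl (fun l c => l.set c v) (d.getD r []) = List.replicate n0 v := by
        apply pvFill
        rw [List.getD_eq_getElem _ _ h]
        exact hinv _ (List.getElem_mem h)
      rw [this]
      apply ih
      intro l hl
      rcases List.mem_or_eq_of_mem_set hl with h1 | h1
      · exact hinv _ h1
      · simp [h1]
    · rw [List.set_eq_of_length_le (by omega), List.set_eq_of_length_le (by omega)]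
      exact ih d hinv

-- counting loop: g == 0 iff no hit
theorem pvCount_eq_zero (l : List Nat) (p : Nat -> Bool) :
    (l.foldl (fun g x => if p x then g + 1 else g) (0 : Int) = 0) ↔ ∀ x ∈ l, ¬ p x := by
  rw [PySem.List.foldl_count_if]
  simp [List.countP_eq_zero]


-- proof-only abbreviations for A's two counting loops and their surviving index lists
def pvGcol (image : List (List String)) (col : Nat) : Int :=
  (List.range image.length).foldl (fun g row => if (image.getD row []).getD col "" == "#" then g + 1 else g) 0
def pvGrow (image : List (List String)) (row : Nat) : Int :=
  (List.range (image.headD []).length).foldl (fun g col => if (image.getD row []).getD col "" == "#" then g + 1 else g) 0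
def pvColAdj (image : List (List String)) : List Nat :=
  (List.range (image.headD []).length).filter (fun col => decide (pvGcol image col = 0))
def pvRowAdj (image : List (List String)) : List Nat :=
  (List.range image.length).filter (fun row => decide (pvGrow image row = 0))
def pvColRow (image : List (List String)) : List Int :=
  (pvColAdj image).reverse.foldl (fun l c => l.set c 1000000) (List.replicate (image.headD []).length 1)

-- the common closed form of both programs
def pvCanon (image : List (List String)) : List (List Int) :=
  (List.range image.length).map (fun r =>
    (List.range (image.headD []).length).map (fun c =>
      if pvGrow image r = 0 ∨ pvGcol image c = 0 then 1000000 else 1))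

theorem pvColRow_eq (image : List (List String)) :
    pvColRow image = (List.range (image.headD []).length).map
      (fun c => if pvGcol image c = 0 then (1000000 : Int) else 1) := by
  unfold pvColRow
  have hL : ((pvColAdj image).reverse.foldl (fun l c => l.set c (1000000 : Int)) (List.replicate (image.headD []).length 1)).length = (image.headD []).length := by
    rw [pvSetFold_length]; simp
  apply List.ext_getElem
  · rw [hL]; simp
  · intro i h1 h2
    have hi : i < (image.headD []).length := by rwa [hL] at h1
    have hi' : i < (image.head?.getD []).length := by simpa [List.headD_eq_head?_getD] using hi
    rw [pvSetFold_getElem _ _ _ _ (by rw [List.length_replicate]; exact hi) h1]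
    simp [pvColAdj, List.mem_reverse, List.mem_filter, List.mem_range, hi']

theorem pvA_main (image : List (List String)) :
    List.foldl
      (fun d row => d.set row (List.foldl (fun l c => l.set c 1000000) (d.getD row []) (List.range (image.headD []).length)))
      (List.foldl
        (fun d row => d.set row (List.foldl (fun l c => l.set c 1000000) (d.getD row []) (pvColAdj image).reverse))
        (List.replicate image.length (List.replicate (image.headD []).length 1)) (List.range image.length))
      (pvRowAdj image).reverse
    = pvCanon image := by
  have hcol := pvMapFold (fun l => List.foldl (fun l c => l.set c (1000000 : Int)) l (pvColAdj image).reverse)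
    (List.replicate image.length (List.replicate (image.headD []).length 1)) image.length (by simp)
  simp only [] at hcol
  rw [hcol]
  rw [List.take_of_length_le (by simp), List.drop_of_length_le (by simp), List.append_nil,
    List.map_replicate]
  rw [show (List.foldl (fun l c => l.set c (1000000 : Int)) (List.replicate (image.headD []).length 1) (pvColAdj image).reverse) = pvColRow image from rfl]
  rw [pvRowPhase (image.headD []).length 1000000 (pvRowAdj image).reverse
      (List.replicate image.length (pvColRow image))
      (by intro l hl; rw [List.eq_of_mem_replicate hl, pvColRow_eq]; simp)]
  apply List.ext_getElem
  · rw [pvSetFold_length]; simp [pvCanon]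
  · intro i h1 h2
    have hi : i < image.length := by rw [pvSetFold_length] at h1; simpa using h1
    rw [pvSetFold_getElem _ _ _ _ (by simpa) h1]
    simp only [pvCanon, List.getElem_map, List.getElem_range, List.getElem_replicate,
      List.mem_reverse]
    by_cases hrow : pvGrow image i = 0
    · have hmem : i ∈ pvRowAdj image := by simp [pvRowAdj, List.mem_filter, hi, hrow]
      rw [if_pos hmem]
      apply List.ext_getElem <;> simp [hrow]
    · have hmem : i ∉ pvRowAdj image := by simp [pvRowAdj, List.mem_filter, hrow]
      rw [if_neg hmem, pvColRow_eq]
      apply List.ext_getElem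
      · simp
      · intro c hc1 hc2
        simp only [List.getElem_map, List.getElem_range]
        simp [hrow]

theorem pvA_canon (image : List (List String)) : distance_image image = pvCanon image := by
  simp only [distance_image]
  simp only [PySem.List.foldl_append_ite_eq_filter, List.nil_append]
  simp only [PySem.List.foldl_append_singleton_eq_map, List.nil_append, List.map_const',
    List.length_range]
  simp only [pvSet2_foldl]
  exact pvA_main image

theorem pvB_canon (image : List (List String))
    (hrowlen : ∀ row ∈ image, (image.headD []).length ≤ row.length) :
    distance_image_alt image = pvCanon image := by
  simp only [distance_image_alt, pvCanon]
  apply List.ext_getElem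
  · simp
  · intro i h1 h2
    have hi : i < image.length := by simpa using h1
    simp only [List.getElem_map, List.getElem_range]
    have hlen : (image.headD []).length ≤ image[i].length :=
      hrowlen _ (List.getElem_mem hi)
    -- row condition: no '#' among the first n0 cells of row i
    have hrowiff : ((image[i].take (image.headD []).length).contains "#" = false)
        ↔ pvGrow image i = 0 := by
      unfold pvGrow
      rw [pvCount_eq_zero]
      rw [show image.getD i [] = image[i] from List.getD_eq_getElem _ _ hi]
      constructor
      · intro h c hc
        simp only [List.mem_range] at hc
        rw [List.getD_eq_getElem _ _ (by omega)]
        intro hhit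
        rw [beq_iff_eq] at hhit
        have hmm : "#" ∈ image[i].take (image.headD []).length := by
          rw [List.mem_iff_getElem]
          exact ⟨c, by rw [List.length_take]; omega, by rw [List.getElem_take]; exact hhit⟩
        have hct := (List.contains_iff_mem).mpr hmm
        exact Bool.false_ne_true (h.symm.trans hct)
      · intro h
        rw [← Bool.not_eq_true, List.contains_iff_mem]
        intro hmem
        rw [List.mem_iff_getElem] at hmem
        obtain ⟨c, hc, hceq⟩ := hmem
        have hcn : c < (image.headD []).length := by rw [List.length_take] at hc; omega
        have := h c (by simpa using hcn)
        rw [List.getD_eq_getElem _ _ (by omega)] at this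
        rw [List.getElem_take] at hceq
        simp [hceq] at this
    -- column condition: no '#' anywhere in column c
    have hcoliff : ∀ c, c < (image.headD []).length →
        (((PySem.Set.ofList (image.flatMap (fun row =>
            (List.range (image.headD []).length).filter (fun c => row.getD c "" == "#")))).contains c = false)
          ↔ pvGcol image c = 0) := by
      intro c hc
      unfold pvGcol
      rw [pvCount_eq_zero]
      rw [show ((PySem.Set.ofList (image.flatMap (fun row => (List.range (image.headD []).length).filter (fun c => row.getD c "" == "#")))).contains c) = decide (c ∈ PySem.Set.ofList (image.flatMap (fun row => (List.range (image.headD []).length).filter (fun c => row.getD c "" == "#")))) from by simp]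
      rw [decide_eq_false_iff_not, PySem.Set.mem_ofList, List.mem_flatMap]
      constructor
      · intro h r hr
        simp only [List.mem_range] at hr
        intro hhit
        exact h ⟨image[r], List.getElem_mem hr, by
          rw [List.getD_eq_getElem _ _ hr] at hhit
          rw [List.mem_filter]
          exact ⟨List.mem_range.mpr hc, hhit⟩⟩
      · rintro h ⟨row, hrowmem, hcfil⟩
        rw [List.mem_iff_getElem] at hrowmem
        obtain ⟨r, hr, hreq⟩ := hrowmem
        have := h r (by simpa using hr)
        rw [List.getD_eq_getElem _ _ hr, hreq] at this
        rw [List.mem_filter] at hcfil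
        exact this hcfil.2
    apply List.ext_getElem
    · simp
    · intro c hc1 hc2
      have hcn : c < (image.headD []).length := by simpa using hc1
      simp only [List.getElem_map, List.getElem_range]
      by_cases hrow : pvGrow image i = 0 <;> by_cases hcol : pvGcol image c = 0
      · rw [hrowiff.mpr hrow]; simp [hrow]
      · rw [hrowiff.mpr hrow]; simp [hrow]
      · rw [(hcoliff c hcn).mpr hcol]; simp [hcol]
      · have e1 : (image[i].take (image.headD []).length).contains "#" = true := by
          cases hX : (image[i].take (image.headD []).length).contains "#"
          · exact absurd (hrowiff.mp hX) hrow
          · rfl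
        have e2 : ((PySem.Set.ofList (image.flatMap (fun row => (List.range (image.headD []).length).filter (fun c => row.getD c "" == "#")))).contains c) = true := by
          cases hX : ((PySem.Set.ofList (image.flatMap (fun row => (List.range (image.headD []).length).filter (fun c => row.getD c "" == "#")))).contains c)
          · exact absurd ((hcoliff c hcn).mp hX) hcol
          · rfl
        rw [e1, e2]; simp [hrow, hcol]

-- ===== VERDICT (by name: the statement is the Claim_ definition above) =====
theorem distance_image_spec : Claim_equal_distance_image := by
  intro image _ hpre
  unfold Spec_distance_image
  rw [pvA_canon, pvB_canon image hpre.2]
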